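-- pv_equiv track=rewrite | github.com/amai2222/cp_jq4 | 36.py | parse_complex_bet
-- ===== SOURCE A (Python) =====
-- def parse_complex_bet(bet_string, expected_len):
--     bet_string = bet_string.strip().replace(" ", ""); parts = []; i = 0
--     while i < len(bet_string):
--         if bet_string[i].isdigit(): parts.append(bet_string[i]); i += 1
--         elif bet_string[i] == '(':
--             end_index = bet_string.find(')', i)
--             if end_index == -1: return None
--             content = bet_string[i+1:end_index]
--             if not content.isdigit(): return None
--             parts.append("".join(sorted(list(set(content))))); i = end_index + 1
--         else: return None
--     return parts if len(parts) == expected_len else None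
-- ===== SOURCE B (Python) =====
-- def parse_complex_bet(bet_string, expected_len):
--     s = bet_string.strip().replace(" ", "")
--     parts = []
--     in_paren = False
--     buf = ""
--     for c in s:
--         if in_paren:
--             if c == ')':
--                 if not buf.isdigit():
--                     return None
--                 parts.append("".join(sorted(set(buf))))
--                 buf = ""
--                 in_paren = False
--             else:
--                 buf += c
--         elif c.isdigit():
--             parts.append(c)
--         elif c == '(':
--             in_paren = True
--         else:
--             return None
--     if in_paren:
--         return None
--     return parts if len(parts) == expected_len else None
-- ===== Notes on version B (the rewrite author's own statement) =====
-- stated objective: alternative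
-- what changed: Replaced the index-based while loop that bulk-reads each group via find(')')+slicing with a single character-by-character state machine (in_paren flag + buffer) that processes the string in one incremental pass.
import Mathlib
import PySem

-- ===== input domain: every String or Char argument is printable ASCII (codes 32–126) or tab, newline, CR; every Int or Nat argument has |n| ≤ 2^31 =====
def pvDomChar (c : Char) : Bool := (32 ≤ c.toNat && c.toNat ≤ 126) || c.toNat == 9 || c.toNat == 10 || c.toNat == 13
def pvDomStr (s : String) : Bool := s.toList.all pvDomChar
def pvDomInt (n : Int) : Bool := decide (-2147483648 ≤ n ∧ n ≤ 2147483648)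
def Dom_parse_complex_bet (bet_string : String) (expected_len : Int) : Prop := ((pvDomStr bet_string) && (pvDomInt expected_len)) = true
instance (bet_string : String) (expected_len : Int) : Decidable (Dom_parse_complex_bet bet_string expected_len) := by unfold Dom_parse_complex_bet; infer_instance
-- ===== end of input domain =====

-- B rewrites A's index/find/slice while-loop as a one-pass character state machine (in_paren flag + buffer); same return value everywhere.

-- ===== PORT A =====
-- "".join(sorted(list(set(content)))) — appears verbatim in both sources
def pvJoinSortedSet (content : List Char) : String :=
  String.ofList (PySem.List.sorted (PySem.Set.ofList content) (fun x => x) false)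

-- A's while-loop over index i, recast as recursion over the suffix drop i (same state: remaining chars + parts);
-- bet_string.find(')', i) is PySem.Chars.find on that suffix (A's i+1 / end_index offsets become the suffix-relative 1 / e).
def pvLoopA : List Char → List String → Option (List String)
  | [], parts => some parts
  | c :: rest, parts =>
    if PySem.Chars.isdigit c then pvLoopA rest (parts ++ [String.ofList [c]])
    else if c = '(' then
      let e := PySem.Chars.find (c :: rest) [')']
      if e = -1 then none
      else
        let content := PySem.List.slice (c :: rest) (some 1) (some e)
        if PySem.Chars.strIsdigit content then
          pvLoopA (List.drop (e.toNat + 1) (c :: rest)) (parts ++ [pvJoinSortedSet content])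
        else none
    else none
termination_by cs _ => cs.length
decreasing_by
  · simp
  · simp only [List.length_drop, List.length_cons]; omega

def parse_complex_bet (bet_string : String) (expected_len : Int) : Option (List String) :=
  let bs := PySem.Chars.replace (PySem.Chars.strip bet_string.toList) [' '] []
  match pvLoopA bs [] with
  | none => none
  | some parts => if (parts.length : Int) = expected_len then some parts else none

-- ===== PORT B =====
-- B's state machine: one char at a time, with in_paren flag and buffer.
def pvLoopB : List Char → Bool → List Char → List String → Option (List String)
  | [], inP, _, parts => if inP then none else some parts
  | c :: rest, inP, buf, parts =>
    if inP then
      if c = ')' then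
        if PySem.Chars.strIsdigit buf then
          pvLoopB rest false [] (parts ++ [pvJoinSortedSet buf])
        else none
      else pvLoopB rest true (buf ++ [c]) parts
    else if PySem.Chars.isdigit c then pvLoopB rest false buf (parts ++ [String.ofList [c]])
    else if c = '(' then pvLoopB rest true buf parts
    else none

def parse_complex_bet_alt (bet_string : String) (expected_len : Int) : Option (List String) :=
  let bs := PySem.Chars.replace (PySem.Chars.strip bet_string.toList) [' '] []
  match pvLoopB bs false [] [] with
  | none => none
  | some parts => if (parts.length : Int) = expected_len then some parts else none

-- ===== PRECONDITION & SPEC =====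
def Spec_parse_complex_bet (bet_string : String) (expected_len : Int) (out : Option (List String)) : Prop := out = parse_complex_bet_alt bet_string expected_len
instance (bet_string : String) (expected_len : Int) (out : Option (List String)) : Decidable (Spec_parse_complex_bet bet_string expected_len out) := by unfold Spec_parse_complex_bet; infer_instance

-- ===== CLAIM (what is proved, stated in full; the proofs are below) =====
def Claim_equal_parse_complex_bet : Prop := ∀ (bet_string : String) (expected_len : Int), Dom_parse_complex_bet bet_string expected_len → Spec_parse_complex_bet bet_string expected_len (parse_complex_bet bet_string expected_len)

-- ===== LEMMAS AND PROOFS =====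

lemma pv_singleton_infix {x : Char} {l : List Char} : [x] <:+: l ↔ x ∈ l := by
  constructor
  · intro h; exact List.singleton_sublist.mp h.sublist
  · intro h
    obtain ⟨s, t, rfl⟩ := List.append_of_mem h
    exact ⟨s, t, by simp⟩

-- B inside a group that never closes returns None
lemma pvLoopB_noclose (rest : List Char) (buf : List Char) (parts : List String)
    (h : ')' ∉ rest) : pvLoopB rest true buf parts = none := by
  induction rest generalizing buf with
  | nil => simp [pvLoopB]
  | cons c cs ih =>
    simp only [List.mem_cons, not_or] at h
    have hc : ¬ c = ')' := fun h' => h.1 h'.symm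
    simp only [pvLoopB, if_neg hc]
    exact ih _ h.2

-- B inside a group consumes up to the first ')' and checks/emits the accumulated buffer
lemma pvLoopB_scan (pre : List Char) (post : List Char) (buf : List Char) (parts : List String)
    (h : ')' ∉ pre) :
    pvLoopB (pre ++ ')' :: post) true buf parts =
      if PySem.Chars.strIsdigit (buf ++ pre) then
        pvLoopB post false [] (parts ++ [pvJoinSortedSet (buf ++ pre)])
      else none := by
  induction pre generalizing buf with
  | nil => simp [pvLoopB]
  | cons c cs ih =>
    simp only [List.mem_cons, not_or] at h
    have hc : ¬ c = ')' := fun h' => h.1 h'.symm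
    simp only [List.cons_append, pvLoopB, if_neg hc]
    rw [ih _ h.2]
    simp

-- A successful find(')') decomposes the suffix after '(' as pre ++ ')' :: post with no ')' in pre,
-- and identifies A's slice/drop with pre/post
lemma pv_find_decomp (rest : List Char)
    (he : ¬ PySem.Chars.find ('(' :: rest) [')'] = -1) :
    ∃ pre post : List Char, rest = pre ++ ')' :: post ∧ ')' ∉ pre ∧
      PySem.List.slice ('(' :: rest) (some 1) (some (PySem.Chars.find ('(' :: rest) [')'])) = pre ∧
      List.drop ((PySem.Chars.find ('(' :: rest) [')']).toNat + 1) ('(' :: rest) = post := by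
  set e := PySem.Chars.find ('(' :: rest) [')'] with hedef
  have h0 : 0 ≤ e := by
    have := PySem.Chars.neg_one_le_find ('(' :: rest) [')']
    rw [← hedef] at this; omega
  obtain ⟨hpref, hmin⟩ := PySem.Chars.find_spec (s := '(' :: rest) (sub := [')']) h0
  rw [← hedef] at hpref hmin
  set n := e.toNat with hndef
  have hn1 : 1 ≤ n := by
    rcases Nat.eq_zero_or_pos n with h | h
    · exfalso
      rw [h] at hpref
      obtain ⟨t, ht⟩ := hpref
      simp at ht
    · exact h
  obtain ⟨t, ht⟩ := hpref
  simp only [List.singleton_append] at ht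
  -- drop n ('(' :: rest) = rest.drop (n-1)
  have hdropn : List.drop n ('(' :: rest) = List.drop (n - 1) rest := by
    have : n = (n - 1) + 1 := by omega
    rw [this]; rfl
  rw [hdropn] at ht
  have hlt : n - 1 < rest.length := by
    by_contra hge
    rw [List.drop_eq_nil_of_le (by omega)] at ht
    exact List.cons_ne_nil _ _ ht
  refine ⟨rest.take (n - 1), rest.drop n, ?_, ?_, ?_, ?_⟩
  · -- rest = pre ++ ')' :: post
    have htail : rest.drop n = t := by
      have h2 : rest.drop n = List.drop 1 (rest.drop (n - 1)) := by
        rw [List.drop_drop]; congr 1; omega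
      rw [h2, ← ht]; rfl
    rw [htail]
    conv_lhs => rw [← List.take_append_drop (n - 1) rest, ← ht]
  · -- no ')' in pre
    intro hmem
    obtain ⟨j, hj, hget⟩ := List.mem_iff_getElem.mp hmem
    have hjlen : j < rest.length := by
      have := hj; simp only [List.length_take] at this; omega
    have hjn : j < n - 1 := by
      have := hj; simp only [List.length_take] at this; omega
    have hgr : rest[j] = ')' := by
      rw [← hget]; simp [List.getElem_take]
    have := hmin (j + 1) (by omega)
    apply this
    have : List.drop (j + 1) ('(' :: rest) = rest.drop j := rfl
    rw [this, List.drop_eq_getElem_cons hjlen, hgr]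
    exact ⟨_, rfl⟩
  · -- the slice is pre
    rw [PySem.List.slice_toNat _ (by omega) h0]
    simp only [Int.toNat_one, List.drop_one, List.tail_cons, ← hndef]
  · rfl

-- the '(' step of A equals the '(' step of B (both digit and non-digit group content)
lemma pv_paren_eq (rest : List Char) (parts : List String)
    (he : ¬ PySem.Chars.find ('(' :: rest) [')'] = -1)
    (ih : PySem.Chars.strIsdigit (PySem.List.slice ('(' :: rest) (some 1) (some (PySem.Chars.find ('(' :: rest) [')']))) = true →
      pvLoopA (List.drop ((PySem.Chars.find ('(' :: rest) [')']).toNat + 1) ('(' :: rest))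
          (parts ++ [pvJoinSortedSet (PySem.List.slice ('(' :: rest) (some 1) (some (PySem.Chars.find ('(' :: rest) [')'])))]) =
        pvLoopB (List.drop ((PySem.Chars.find ('(' :: rest) [')']).toNat + 1) ('(' :: rest)) false []
          (parts ++ [pvJoinSortedSet (PySem.List.slice ('(' :: rest) (some 1) (some (PySem.Chars.find ('(' :: rest) [')'])))])) :
    pvLoopA ('(' :: rest) parts = pvLoopB ('(' :: rest) false [] parts := by
  obtain ⟨pre, post, hrest, hnot, hslice, hdrop⟩ := pv_find_decomp rest he
  rw [pvLoopA]
  simp only [show ¬ PySem.Chars.isdigit '(' = true from by decide,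
    if_neg he, hslice, hdrop]
  rw [pvLoopB]
  simp only [Bool.false_eq_true, if_false,
    show ¬ PySem.Chars.isdigit '(' = true from by decide]
  conv_rhs => rw [hrest]
  rw [pvLoopB_scan pre post [] parts hnot]
  simp only [List.nil_append]
  rw [hslice, hdrop] at ih
  by_cases hdig : PySem.Chars.strIsdigit pre = true
  · simp only [if_pos hdig]; exact ih hdig
  · simp only [if_neg hdig]

lemma pvLoop_eq (cs : List Char) (parts : List String) :
    pvLoopA cs parts = pvLoopB cs false [] parts := by
  induction cs, parts using pvLoopA.induct with
  | case1 parts => simp [pvLoopA, pvLoopB]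
  | case2 c rest parts hd ih =>
    rw [pvLoopA, pvLoopB]
    simp only [if_pos hd, Bool.false_eq_true, if_false, ih]
  | case3 rest parts hd e he =>
    have hninf : ¬ ([')'] <:+: ('(' :: rest)) := by
      rw [← PySem.Chars.find_ne_neg_one_iff]
      simpa using he
    rw [pv_singleton_infix] at hninf
    have hns : ')' ∉ rest := fun hm => hninf (List.mem_cons_of_mem _ hm)
    have he' : PySem.Chars.find ('(' :: rest) [')'] = -1 := he
    simp [pvLoopA, pvLoopB, hd, he', pvLoopB_noclose _ _ _ hns]
  | case4 rest parts hd e he content hdig ih =>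
    exact pv_paren_eq rest parts he (fun _ => ih)
  | case5 rest parts hd e he content hdig =>
    exact pv_paren_eq rest parts he (fun h => absurd h hdig)
  | case6 c rest parts hd hp =>
    rw [pvLoopA, pvLoopB]
    simp only [if_neg hd, if_neg hp, Bool.false_eq_true, if_false]

-- ===== VERDICT (by name: the statement is the Claim_ definition above) =====
theorem parse_complex_bet_spec : Claim_equal_parse_complex_bet := by
  intro s e _
  show parse_complex_bet s e = parse_complex_bet_alt s e
  simp only [parse_complex_bet, parse_complex_bet_alt, pvLoop_eq]
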